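-- pv_equiv track=rewrite | github.com/charonstr/flux | core/abysslegacy_backend.py | _abyss_legacy_match_compatible
-- ===== SOURCE A (Python) =====
-- ABYSS_LEGACY_RANK_ORDER = [
--     "bronz3",
--     "bronz2",
--     "bronz1",
--     "gumus3",
--     "gumus2",
--     "gumus1",
--     "altin3",
--     "altin2",
--     "altin1",
--     "platin3",
--     "platin2",
--     "platin1",
--     "elmas3",
--     "elmas2",
--     "elmas1",
--     "obsidyen",
-- ]
--
-- ABYSS_LEGACY_DEFAULT_RANK = "bronz3"
--
-- ABYSS_LEGACY_RANK_LABELS = {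
--     "bronz3": "Bronz 3",
--     "bronz2": "Bronz 2",
--     "bronz1": "Bronz 1",
--     "gumus3": "Gümüş 3",
--     "gumus2": "Gümüş 2",
--     "gumus1": "Gümüş 1",
--     "altin3": "Altın 3",
--     "altin2": "Altın 2",
--     "altin1": "Altın 1",
--     "platin3": "Platin 3",
--     "platin2": "Platin 2",
--     "platin1": "Platin 1",
--     "elmas3": "Elmas 3",
--     "elmas2": "Elmas 2",
--     "elmas1": "Elmas 1",
--     "obsidyen": "Obsidyen",
-- }
--
-- def _normalize_abyss_legacy_rank(rank_code: str) -> str: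
--     code = str(rank_code or "").strip().lower()
--     return code if code in ABYSS_LEGACY_RANK_LABELS else ABYSS_LEGACY_DEFAULT_RANK
--
-- def _abyss_legacy_match_compatible(rank_a: str, rank_b: str) -> bool:
--     a = _normalize_abyss_legacy_rank(rank_a)
--     b = _normalize_abyss_legacy_rank(rank_b)
--     if a == b:
--         return True
--
--     def _major(code: str) -> str:
--         return "".join(ch for ch in code if not ch.isdigit())
--
--     am = _major(a)
--     bm = _major(b)
--     if am == bm:
--         return True
--
--     majors = ["bronze", "silver", "gold", "platinum", "diamond", "obsidian"]
--     if am in majors and bm in majors: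
--         ai = majors.index(am)
--         bi = majors.index(bm)
--         if abs(ai - bi) == 1:
--             # Bridge rule: only rank 1 can cross to adjacent major rank.
--             return a.endswith("1") or b.endswith("1")
--
--     # Conservative fallback.
--     ra = ABYSS_LEGACY_RANK_ORDER.index(a)
--     rb = ABYSS_LEGACY_RANK_ORDER.index(b)
--     return abs(ra - rb) <= 1
-- ===== SOURCE B (Python) =====
-- ABYSS_LEGACY_RANK_ORDER = [
--     "bronz3", "bronz2", "bronz1",
--     "gumus3", "gumus2", "gumus1",
--     "altin3", "altin2", "altin1",
--     "platin3", "platin2", "platin1",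
--     "elmas3", "elmas2", "elmas1",
--     "obsidyen",
-- ]
--
-- ABYSS_LEGACY_DEFAULT_RANK = "bronz3"
--
-- ABYSS_LEGACY_RANK_LABELS = {
--     "bronz3": "Bronz 3", "bronz2": "Bronz 2", "bronz1": "Bronz 1",
--     "gumus3": "Gümüş 3", "gumus2": "Gümüş 2", "gumus1": "Gümüş 1",
--     "altin3": "Altın 3", "altin2": "Altın 2", "altin1": "Altın 1",
--     "platin3": "Platin 3", "platin2": "Platin 2", "platin1": "Platin 1",
--     "elmas3": "Elmas 3", "elmas2": "Elmas 2", "elmas1": "Elmas 1",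
--     "obsidyen": "Obsidyen",
-- }
--
-- def _normalize_abyss_legacy_rank(rank_code: str) -> str:
--     code = str(rank_code or "").strip().lower()
--     return code if code in ABYSS_LEGACY_RANK_LABELS else ABYSS_LEGACY_DEFAULT_RANK
--
-- def _abyss_legacy_match_compatible(rank_a: str, rank_b: str) -> bool:
--     # Decide purely from positions in the rank order: ranks come in threes
--     # (obsidyen alone in group 5), so same major <=> same index // 3;
--     # the conservative fallback is index distance <= 1.
--     ia = ABYSS_LEGACY_RANK_ORDER.index(_normalize_abyss_legacy_rank(rank_a))
--     ib = ABYSS_LEGACY_RANK_ORDER.index(_normalize_abyss_legacy_rank(rank_b))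
--     return ia // 3 == ib // 3 or abs(ia - ib) <= 1
-- ===== Notes on version B (the rewrite author's own statement) =====
-- stated objective: simpler
-- what changed: B replaces A's cascade (equality check, digit-stripped major comparison, dead English-majors bridge branch, index-distance fallback) by a single arithmetic decision on the two rank indices: ia//3 == ib//3 or |ia-ib| <= 1.
import Mathlib
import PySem

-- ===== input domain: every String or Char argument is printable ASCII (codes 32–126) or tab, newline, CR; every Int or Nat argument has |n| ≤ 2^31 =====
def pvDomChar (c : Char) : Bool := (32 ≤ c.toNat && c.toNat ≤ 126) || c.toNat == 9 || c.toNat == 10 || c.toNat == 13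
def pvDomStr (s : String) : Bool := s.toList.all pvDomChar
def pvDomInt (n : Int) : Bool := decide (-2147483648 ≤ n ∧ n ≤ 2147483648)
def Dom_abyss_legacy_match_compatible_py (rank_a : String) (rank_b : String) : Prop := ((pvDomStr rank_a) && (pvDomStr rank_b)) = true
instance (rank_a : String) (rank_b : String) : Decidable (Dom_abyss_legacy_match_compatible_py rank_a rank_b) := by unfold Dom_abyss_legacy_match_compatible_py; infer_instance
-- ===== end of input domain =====

-- B decides compatibility arithmetically from the two rank indices instead of A's
-- cascade of string checks (objective: simpler); A's English-majors bridge branch is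
-- provably unreachable for the Turkish codes.

-- ABYSS_LEGACY_RANK_ORDER
def pvRankOrder : List String :=
  ["bronz3", "bronz2", "bronz1", "gumus3", "gumus2", "gumus1",
   "altin3", "altin2", "altin1", "platin3", "platin2", "platin1",
   "elmas3", "elmas2", "elmas1", "obsidyen"]

-- ABYSS_LEGACY_RANK_LABELS (dict; values as in the source)
def pvRankLabels : PySem.Dict String String := PySem.Dict.ofList
  [("bronz3", "Bronz 3"), ("bronz2", "Bronz 2"), ("bronz1", "Bronz 1"),
   ("gumus3", "Gümüş 3"), ("gumus2", "Gümüş 2"), ("gumus1", "Gümüş 1"),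
   ("altin3", "Altın 3"), ("altin2", "Altın 2"), ("altin1", "Altın 1"),
   ("platin3", "Platin 3"), ("platin2", "Platin 2"), ("platin1", "Platin 1"),
   ("elmas3", "Elmas 3"), ("elmas2", "Elmas 2"), ("elmas1", "Elmas 1"),
   ("obsidyen", "Obsidyen")]

-- _normalize_abyss_legacy_rank (module helper, called by both A and B in Python)
def pvNormalize (rank_code : String) : String :=
  let s := if rank_code == "" then "" else rank_code   -- str(rank_code or "")
  let code := PySem.Str.lower (PySem.Str.strip s)
  if PySem.Dict.contains pvRankLabels code then code else "bronz3"

-- ===== PORT A =====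
-- _major: "".join(ch for ch in code if not ch.isdigit())
def pvMajorA (code : String) : String :=
  String.ofList (code.toList.filter (fun ch => !(PySem.Str.isdigit ch)))

-- body of _abyss_legacy_match_compatible after the two normalizations
-- (ABYSS_LEGACY_RANK_ORDER.index never raises here: normalized codes are members;
--  the 'none' branches are unreachable)
def pvCoreA (a b : String) : Bool :=
  if a == b then true
  else
    let am := pvMajorA a
    let bm := pvMajorA b
    if am == bm then true
    else
      let majors := ["bronze", "silver", "gold", "platinum", "diamond", "obsidian"]
      let bridge : Option Bool :=
        if majors.contains am && majors.contains bm then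
          match PySem.List.index? majors am, PySem.List.index? majors bm with
          | some ai, some bi =>
              if (if (ai : Int) - bi < 0 then (bi : Int) - ai else (ai : Int) - bi) = 1 then
                some (PySem.Str.endswith a "1" || PySem.Str.endswith b "1")
              else none
          | _, _ => none
        else none
      match bridge with
      | some r => r
      | none =>
        match PySem.List.index? pvRankOrder a, PySem.List.index? pvRankOrder b with
        | some ra, some rb =>
            decide ((if (ra : Int) - rb < 0 then (rb : Int) - ra else (ra : Int) - rb) ≤ 1)
        | _, _ => false

def abyss_legacy_match_compatible_py (rank_a : String) (rank_b : String) : Bool :=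
  pvCoreA (pvNormalize rank_a) (pvNormalize rank_b)

-- ===== PORT B =====
def pvCoreB (a b : String) : Bool :=
  match PySem.List.index? pvRankOrder a, PySem.List.index? pvRankOrder b with
  | some ia, some ib =>
      (ia / 3 == ib / 3) ||
      decide ((if (ia : Int) - ib < 0 then (ib : Int) - ia else (ia : Int) - ib) ≤ 1)
  | _, _ => false

def abyss_legacy_match_compatible_py_alt (rank_a : String) (rank_b : String) : Bool :=
  pvCoreB (pvNormalize rank_a) (pvNormalize rank_b)

-- ===== PRECONDITION & SPEC =====
def Spec_abyss_legacy_match_compatible_py (rank_a : String) (rank_b : String) (out : Bool) : Prop := out = abyss_legacy_match_compatible_py_alt rank_a rank_b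
instance (rank_a : String) (rank_b : String) (out : Bool) : Decidable (Spec_abyss_legacy_match_compatible_py rank_a rank_b out) := by unfold Spec_abyss_legacy_match_compatible_py; infer_instance

-- ===== CLAIM (what is proved, stated in full; the proofs are below) =====
def Claim_equal_abyss_legacy_match_compatible_py : Prop := ∀ (rank_a : String) (rank_b : String), Dom_abyss_legacy_match_compatible_py rank_a rank_b → Spec_abyss_legacy_match_compatible_py rank_a rank_b (abyss_legacy_match_compatible_py rank_a rank_b)

-- ===== LEMMAS AND PROOFS =====

-- the normalized code is always one of the 16 rank codes
theorem pvNormalize_mem (s : String) : pvNormalize s ∈ pvRankOrder := by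
  unfold pvNormalize
  by_cases h : PySem.Dict.contains pvRankLabels
      (PySem.Str.lower (PySem.Str.strip (if s == "" then "" else s))) = true
  · rw [if_pos h]
    have hk := (PySem.Dict.contains_iff_mem_keys _ _).mp h
    have hkeys : pvRankLabels.keys = pvRankOrder := by decide
    rwa [hkeys] at hk
  · rw [if_neg h]
    decide

-- the cores agree on all 16 × 16 normalized pairs
set_option maxHeartbeats 2000000 in
theorem pvCore_eq : ∀ a ∈ pvRankOrder, ∀ b ∈ pvRankOrder, pvCoreA a b = pvCoreB a b := by
  decide

-- ===== VERDICT (by name: the statement is the Claim_ definition above) =====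
theorem abyss_legacy_match_compatible_py_spec : Claim_equal_abyss_legacy_match_compatible_py := by
  intro rank_a rank_b _
  unfold Spec_abyss_legacy_match_compatible_py
  unfold abyss_legacy_match_compatible_py abyss_legacy_match_compatible_py_alt
  exact pvCore_eq _ (pvNormalize_mem rank_a) _ (pvNormalize_mem rank_b)
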